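-- pv_equiv track=rewrite | github.com/moonbit-community/moonpython | Lib/re.py | _subn_trim_before_close_bracket
-- ===== SOURCE A (Python) =====
-- def _subn_trim_before_close_bracket(string, count=0):
--     out = []
--     n = 0
--     i = 0
--     while i < len(string):
--         if string[i] == " " and i + 1 < len(string) and (string[i + 1] == "]" or string[i + 1] == ")") and (count == 0 or n < count):
--             out.append(string[i + 1])
--             n += 1
--             i += 2
--             continue
--         out.append(string[i])
--         i += 1
--     return "".join(out), n
-- ===== SOURCE B (Python) =====
-- def _subn_trim_before_close_bracket(string, count=0):
--     # Jump between occurrences with str.find and copy whole chunks,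
--     # instead of scanning character by character.
--     out = []
--     n = 0
--     pos = 0
--     while count == 0 or n < count:
--         j1 = string.find(" ]", pos)
--         j2 = string.find(" )", pos)
--         if j1 == -1:
--             j = j2
--         elif j2 == -1:
--             j = j1
--         else:
--             j = min(j1, j2)
--         if j == -1:
--             break
--         out.append(string[pos:j])
--         out.append(string[j + 1])
--         n += 1
--         pos = j + 2
--     out.append(string[pos:])
--     return "".join(out), n
-- ===== Notes on version B (the rewrite author's own statement) =====
-- stated objective: faster
-- what changed: Replaced the per-character index scan with a find-and-jump loop: str.find locates the next space-before-close-bracket occurrence and whole chunks are copied between matches.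
import Mathlib
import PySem

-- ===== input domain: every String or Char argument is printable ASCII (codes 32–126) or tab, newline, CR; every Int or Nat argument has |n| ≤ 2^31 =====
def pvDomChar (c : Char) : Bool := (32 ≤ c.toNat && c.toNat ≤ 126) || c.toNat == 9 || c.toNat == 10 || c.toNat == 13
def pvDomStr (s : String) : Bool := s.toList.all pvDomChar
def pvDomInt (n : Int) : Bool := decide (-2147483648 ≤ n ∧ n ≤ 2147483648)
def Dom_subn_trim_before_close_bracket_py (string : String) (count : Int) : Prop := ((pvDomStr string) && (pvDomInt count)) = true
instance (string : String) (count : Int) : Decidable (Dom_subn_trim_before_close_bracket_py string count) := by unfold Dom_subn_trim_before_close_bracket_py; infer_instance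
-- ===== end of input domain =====

-- B replaces A's per-character index scan by a find-and-jump loop copying whole chunks between matches (objective: alternative).

-- ===== PORT A =====
-- A's while loop over index i, accumulating `out` and the replacement count `n`.
def pvGoA (cs : List Char) (count : Int) (out : List Char) (n : Int) (i : Nat) :
    List Char × Int :=
  if h : i < cs.length then
    if cs.getD i ' ' = ' ' ∧ i + 1 < cs.length ∧
        (cs.getD (i+1) ' ' = ']' ∨ cs.getD (i+1) ' ' = ')') ∧
        (count = 0 ∨ n < count) then
      pvGoA cs count (out ++ [cs.getD (i+1) ' ']) (n + 1) (i + 2)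
    else
      pvGoA cs count (out ++ [cs.getD i ' ']) n (i + 1)
  else (out, n)
termination_by cs.length - i

def subn_trim_before_close_bracket_py (string : String) (count : Int) : String × Int :=
  let r := pvGoA string.toList count [] 0 0
  (String.ofList r.1, r.2)

-- ===== PORT B =====
-- B's j1/j2/min combine: the nearer of string.find(" ]", pos) and string.find(" )", pos)
def pvNextJ (cs : List Char) (pos : Nat) : Int :=
  let j1 := PySem.Chars.findFrom cs [' ', ']'] (pos : Int) none
  let j2 := PySem.Chars.findFrom cs [' ', ')'] (pos : Int) none
  if j1 = -1 then j2 else if j2 = -1 then j1 else min j1 j2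

-- termination facts for pvGoB (cited in its decreasing_by)
theorem pvNextJ_bounds {cs : List Char} {pos : Nat} (hpos : pos ≤ cs.length)
    (h : pvNextJ cs pos ≠ -1) :
    (pos : Int) ≤ pvNextJ cs pos ∧ (pvNextJ cs pos).toNat + 2 ≤ cs.length := by
  have room : ∀ c : Char, PySem.Chars.findFrom cs [' ', c] (pos : Int) none ≠ -1 →
      (pos : Int) ≤ PySem.Chars.findFrom cs [' ', c] (pos : Int) none ∧
      (PySem.Chars.findFrom cs [' ', c] (pos : Int) none).toNat + 2 ≤ cs.length := by
    intro c hc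
    obtain ⟨h1, h2, -⟩ := PySem.Chars.findFrom_natCast_spec cs [' ', c] pos hpos hc
    refine ⟨h1, ?_⟩
    have := h2.length_le
    simp only [List.length_drop, List.length_cons, List.length_nil] at this
    omega
  unfold pvNextJ at h ⊢
  by_cases h1 : PySem.Chars.findFrom cs [' ', ']'] (pos : Int) none = -1
  · simp only [h1, if_pos] at h ⊢
    exact room ')' h
  · by_cases h2 : PySem.Chars.findFrom cs [' ', ')'] (pos : Int) none = -1
    · simp only [if_neg h1, h2, if_pos] at h ⊢
      exact room ']' h1
    · simp only [if_neg h1, if_neg h2] at h ⊢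
      rcases min_cases (PySem.Chars.findFrom cs [' ', ']'] (pos : Int) none)
        (PySem.Chars.findFrom cs [' ', ')'] (pos : Int) none) with ⟨he, _⟩ | ⟨he, _⟩ <;>
        rw [he]
      · exact room ']' h1
      · exact room ')' h2

-- B's while loop: find the next " ]" / " )" from pos, copy the chunk before it,
-- append the bracket, jump past the match.
def pvGoB (cs : List Char) (count : Int) (n : Int) (pos : Nat) (out : List Char)
    (hpos : pos ≤ cs.length) : List Char × Int :=
  if count = 0 ∨ n < count then
    if hj : pvNextJ cs pos = -1 then (out ++ cs.drop pos, n)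
    else
      pvGoB cs count (n + 1) ((pvNextJ cs pos).toNat + 2)
        (out ++ PySem.List.slice cs (some (pos : Int)) (some (pvNextJ cs pos)) ++
          [(PySem.List.pyGet? cs (pvNextJ cs pos + 1)).getD ' '])
        ((pvNextJ_bounds hpos hj).2)
  else (out ++ cs.drop pos, n)
termination_by cs.length - pos
decreasing_by
  obtain ⟨h1, h2⟩ := pvNextJ_bounds hpos hj
  omega

def subn_trim_before_close_bracket_py_alt (string : String) (count : Int) : String × Int :=
  let r := pvGoB string.toList count 0 0 [] (Nat.zero_le _)
  (String.ofList r.1, r.2)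

-- ===== PRECONDITION & SPEC =====
def Spec_subn_trim_before_close_bracket_py (string : String) (count : Int) (out : String × Int) : Prop := out = subn_trim_before_close_bracket_py_alt string count
instance (string : String) (count : Int) (out : String × Int) : Decidable (Spec_subn_trim_before_close_bracket_py string count out) := by unfold Spec_subn_trim_before_close_bracket_py; infer_instance

-- ===== CLAIM (what is proved, stated in full; the proofs are below) =====
def Claim_equal_subn_trim_before_close_bracket_py : Prop := ∀ (string : String) (count : Int), Dom_subn_trim_before_close_bracket_py string count → Spec_subn_trim_before_close_bracket_py string count (subn_trim_before_close_bracket_py string count)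

-- ===== LEMMAS AND PROOFS =====

-- "match at position k": a space followed by ']' or ')'
def pvM (cs : List Char) (k : Nat) : Prop :=
  k + 1 < cs.length ∧ cs.getD k ' ' = ' ' ∧
    (cs.getD (k+1) ' ' = ']' ∨ cs.getD (k+1) ' ' = ')')

theorem pvInfix_iff_exists_drop {α : Type} (l t : List α) :
    l <:+: t ↔ ∃ k, l <+: t.drop k := by
  constructor
  · rintro ⟨s, u, rfl⟩
    exact ⟨s.length, by simp [List.append_assoc, List.drop_left]⟩
  · rintro ⟨k, h⟩
    exact h.isInfix.trans (t.drop_suffix k).isInfix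

theorem pvPrefix_pair_iff (cs : List Char) (a b : Char) (k : Nat) :
    [a, b] <+: cs.drop k ↔
      k + 1 < cs.length ∧ cs.getD k ' ' = a ∧ cs.getD (k+1) ' ' = b := by
  constructor
  · rintro ⟨t, ht⟩
    have hlen : k + 2 ≤ cs.length := by
      have := congrArg List.length ht
      simp only [List.length_append, List.length_cons, List.length_nil,
        List.length_drop] at this
      omega
    have h0 : (cs.drop k)[0]? = some a := by rw [← ht]; rfl
    have h1 : (cs.drop k)[1]? = some b := by rw [← ht]; rfl
    rw [List.getElem?_drop] at h0 h1
    refine ⟨by omega, ?_, ?_⟩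
    · have : cs[k]? = some a := by simpa using h0
      simpa [List.getD_eq_getElem?_getD, this]
    · have : cs[k+1]? = some b := by simpa using h1
      simpa [List.getD_eq_getElem?_getD, this]
  · rintro ⟨hlen, ha, hb⟩
    have ha' : cs[k]? = some a := by
      rw [List.getD_eq_getElem?_getD] at ha
      rcases h : cs[k]? with _ | x
      · rw [List.getElem?_eq_none_iff] at h; omega
      · rw [h] at ha; simp at ha; rw [ha]
    have hb' : cs[k+1]? = some b := by
      rw [List.getD_eq_getElem?_getD] at hb
      rcases h : cs[k+1]? with _ | x
      · rw [List.getElem?_eq_none_iff] at h; omega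
      · rw [h] at hb; simp at hb; rw [hb]
    have hd0 : (cs.drop k)[0]? = some a := by rw [List.getElem?_drop]; simpa using ha'
    have hd1 : (cs.drop k)[1]? = some b := by rw [List.getElem?_drop]; exact hb'
    rcases hdk : cs.drop k with _ | ⟨x, _ | ⟨y, t⟩⟩ <;> rw [hdk] at hd0 hd1 <;>
      simp_all

theorem pvM_iff (cs : List Char) (k : Nat) :
    pvM cs k ↔ ([' ', ']'] <+: cs.drop k ∨ [' ', ')'] <+: cs.drop k) := by
  rw [pvPrefix_pair_iff, pvPrefix_pair_iff]
  unfold pvM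
  tauto

-- pvNextJ = -1 exactly when there is no match at or after pos
theorem pvNextJ_eq_neg_one_iff {cs : List Char} {pos : Nat} (hpos : pos ≤ cs.length) :
    pvNextJ cs pos = -1 ↔ ∀ k, pos ≤ k → ¬ pvM cs k := by
  have hiff : ∀ c : Char, (PySem.Chars.findFrom cs [' ', c] (pos : Int) none = -1 ↔
      ∀ k, pos ≤ k → ¬ [' ', c] <+: cs.drop k) := by
    intro c
    rw [PySem.Chars.findFrom_natCast_eq_neg_one_iff cs [' ', c] pos hpos,
      pvInfix_iff_exists_drop]
    constructor
    · intro h k hk hp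
      exact h ⟨k - pos, by rw [List.drop_drop, Nat.add_sub_cancel' hk]; exact hp⟩
    · rintro h ⟨m, hm⟩
      rw [List.drop_drop] at hm
      exact h (pos + m) (Nat.le_add_right _ _) hm
  constructor
  · intro h k hk hm
    rw [pvM_iff] at hm
    unfold pvNextJ at h
    by_cases h1 : PySem.Chars.findFrom cs [' ', ']'] (pos : Int) none = -1
    · simp only [h1, if_pos] at h
      rcases hm with hm | hm
      · exact (hiff ']').mp h1 k hk hm
      · exact (hiff ')').mp h k hk hm
    · by_cases h2 : PySem.Chars.findFrom cs [' ', ')'] (pos : Int) none = -1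
      · simp only [if_neg h1, h2, if_pos] at h
        exact h1 h
      · simp only [if_neg h1, if_neg h2] at h
        have g1 := pvNextJ_bounds (cs := cs) (pos := pos) hpos
        have b1 := (PySem.Chars.findFrom_natCast_spec cs [' ', ']'] pos hpos h1).1
        have b2 := (PySem.Chars.findFrom_natCast_spec cs [' ', ')'] pos hpos h2).1
        rcases min_cases (PySem.Chars.findFrom cs [' ', ']'] (pos : Int) none)
          (PySem.Chars.findFrom cs [' ', ')'] (pos : Int) none) with ⟨he, _⟩ | ⟨he, _⟩ <;>
          rw [he] at h
        · exact h1 h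
        · exact h2 h
  · intro h
    unfold pvNextJ
    have g1 : PySem.Chars.findFrom cs [' ', ']'] (pos : Int) none = -1 :=
      (hiff ']').mpr fun k hk hp => h k hk ((pvM_iff cs k).mpr (Or.inl hp))
    have g2 : PySem.Chars.findFrom cs [' ', ')'] (pos : Int) none = -1 :=
      (hiff ')').mpr fun k hk hp => h k hk ((pvM_iff cs k).mpr (Or.inr hp))
    simp [g1, g2]

-- when pvNextJ finds j: j is the least match position ≥ pos
theorem pvNextJ_found {cs : List Char} {pos : Nat} (hpos : pos ≤ cs.length)
    (h : pvNextJ cs pos ≠ -1) :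
    pos ≤ (pvNextJ cs pos).toNat ∧ pvM cs (pvNextJ cs pos).toNat ∧
      ∀ k, pos ≤ k → k < (pvNextJ cs pos).toNat → ¬ pvM cs k := by
  have key : ∀ c : Char, ∀ hc : PySem.Chars.findFrom cs [' ', c] (pos : Int) none ≠ -1,
      pos ≤ (PySem.Chars.findFrom cs [' ', c] (pos : Int) none).toNat ∧
      [' ', c] <+: cs.drop (PySem.Chars.findFrom cs [' ', c] (pos : Int) none).toNat ∧
      ∀ k, pos ≤ k → k < (PySem.Chars.findFrom cs [' ', c] (pos : Int) none).toNat →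
        ¬ [' ', c] <+: cs.drop k := by
    intro c hc
    obtain ⟨b1, b2, b3⟩ := PySem.Chars.findFrom_natCast_spec cs [' ', c] pos hpos hc
    refine ⟨by omega, b2, fun k hk hk2 => b3 k (by omega) (by omega)⟩
  have habs : ∀ c : Char, PySem.Chars.findFrom cs [' ', c] (pos : Int) none = -1 →
      ∀ k, pos ≤ k → ¬ [' ', c] <+: cs.drop k := by
    intro c hc k hk hp
    rw [PySem.Chars.findFrom_natCast_eq_neg_one_iff cs [' ', c] pos hpos,
      pvInfix_iff_exists_drop] at hc
    exact hc ⟨k - pos, by rw [List.drop_drop, Nat.add_sub_cancel' hk]; exact hp⟩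
  unfold pvNextJ at h ⊢
  by_cases h1 : PySem.Chars.findFrom cs [' ', ']'] (pos : Int) none = -1
  · simp only [h1, if_pos] at h ⊢
    obtain ⟨k1, k2, k3⟩ := key ')' h
    refine ⟨k1, (pvM_iff _ _).mpr (Or.inr k2), fun k hk hk2 hm => ?_⟩
    rcases (pvM_iff _ _).mp hm with hm | hm
    · exact habs ']' h1 k hk hm
    · exact k3 k hk hk2 hm
  · by_cases h2 : PySem.Chars.findFrom cs [' ', ')'] (pos : Int) none = -1
    · simp only [if_neg h1, h2, if_pos] at h ⊢
      obtain ⟨k1, k2, k3⟩ := key ']' h1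
      refine ⟨k1, (pvM_iff _ _).mpr (Or.inl k2), fun k hk hk2 hm => ?_⟩
      rcases (pvM_iff _ _).mp hm with hm | hm
      · exact k3 k hk hk2 hm
      · exact habs ')' h2 k hk hm
    · simp only [if_neg h1, if_neg h2] at h ⊢
      obtain ⟨a1, a2, a3⟩ := key ']' h1
      obtain ⟨c1, c2, c3⟩ := key ')' h2
      have hmin := min_le_left (PySem.Chars.findFrom cs [' ', ']'] (pos : Int) none)
        (PySem.Chars.findFrom cs [' ', ')'] (pos : Int) none)
      have hmin2 := min_le_right (PySem.Chars.findFrom cs [' ', ']'] (pos : Int) none)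
        (PySem.Chars.findFrom cs [' ', ')'] (pos : Int) none)
      have hnn1 : (0:Int) ≤ PySem.Chars.findFrom cs [' ', ']'] (pos : Int) none := by
        have := (PySem.Chars.findFrom_natCast_spec cs [' ', ']'] pos hpos h1).1; omega
      have hnn2 : (0:Int) ≤ PySem.Chars.findFrom cs [' ', ')'] (pos : Int) none := by
        have := (PySem.Chars.findFrom_natCast_spec cs [' ', ')'] pos hpos h2).1; omega
      rcases min_cases (PySem.Chars.findFrom cs [' ', ']'] (pos : Int) none)
        (PySem.Chars.findFrom cs [' ', ')'] (pos : Int) none) with ⟨he, hle⟩ | ⟨he, hlt⟩ <;>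
        rw [he]
      · refine ⟨a1, (pvM_iff _ _).mpr (Or.inl a2), fun k hk hk2 hm => ?_⟩
        rcases (pvM_iff _ _).mp hm with hm | hm
        · exact a3 k hk hk2 hm
        · exact c3 k hk (by omega) hm
      · refine ⟨c1, (pvM_iff _ _).mpr (Or.inr c2), fun k hk hk2 hm => ?_⟩
        rcases (pvM_iff _ _).mp hm with hm | hm
        · exact a3 k hk (by omega) hm
        · exact c3 k hk hk2 hm

-- dead budget: A copies the rest verbatim
theorem pvGoA_dead_aux (cs : List Char) (count n : Int)
    (hb : ¬ (count = 0 ∨ n < count)) :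
    ∀ fuel i out, cs.length - i ≤ fuel → pvGoA cs count out n i = (out ++ cs.drop i, n) := by
  intro fuel
  induction fuel with
  | zero =>
    intro i out hf
    rw [pvGoA, dif_neg (by omega : ¬ i < cs.length)]
    simp [List.drop_eq_nil_of_le (by omega : cs.length ≤ i)]
  | succ f ih =>
    intro i out hf
    rw [pvGoA]
    by_cases h : i < cs.length
    · rw [dif_pos h, if_neg (by tauto), ih (i+1) _ (by omega)]
      rw [show cs.drop i = cs[i] :: cs.drop (i+1) from List.drop_eq_getElem_cons h,
        List.getD_eq_getElem _ _ h, List.append_assoc]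
      rfl
    · rw [dif_neg h]
      simp [List.drop_eq_nil_of_le (by omega : cs.length ≤ i)]

theorem pvGoA_dead (cs : List Char) (count n : Int)
    (hb : ¬ (count = 0 ∨ n < count)) :
    ∀ i out, pvGoA cs count out n i = (out ++ cs.drop i, n) :=
  fun i out => pvGoA_dead_aux cs count n hb (cs.length - i) i out le_rfl

-- no match in [i, j): A copies cs[i:j] verbatim
theorem pvGoA_copy_aux (cs : List Char) (count n : Int) (j : Nat) (hj : j ≤ cs.length) :
    ∀ fuel i out, j - i ≤ fuel → i ≤ j → (∀ k, i ≤ k → k < j → ¬ pvM cs k) →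
      pvGoA cs count out n i = pvGoA cs count (out ++ (cs.drop i).take (j - i)) n j := by
  intro fuel
  induction fuel with
  | zero =>
    intro i out hf hij hnm
    have : i = j := by omega
    subst this
    simp
  | succ f ih =>
    intro i out hf hij hnm
    by_cases hi : i = j
    · subst hi; simp
    · have hij' : i < j := by omega
      have hlen : i < cs.length := by omega
      rw [pvGoA, dif_pos hlen,
        if_neg (fun ⟨c1, c2, c3, _⟩ => hnm i le_rfl hij' ⟨c2, c1, c3⟩),
        ih (i+1) (out ++ [cs.getD i ' ']) (by omega) (by omega)
          (fun k hk hk2 => hnm k (by omega) hk2)]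
      congr 1
      rw [List.append_assoc]
      congr 1
      rw [List.getD_eq_getElem _ _ hlen,
        show cs.drop i = cs[i] :: cs.drop (i+1) from List.drop_eq_getElem_cons hlen,
        show j - i = (j - (i+1)) + 1 by omega, List.take_succ_cons]
      rfl

theorem pvGoA_copy (cs : List Char) (count n : Int) (i j : Nat)
    (hij : i ≤ j) (hj : j ≤ cs.length)
    (hnm : ∀ k, i ≤ k → k < j → ¬ pvM cs k) :
    ∀ out, pvGoA cs count out n i =
      pvGoA cs count (out ++ (cs.drop i).take (j - i)) n j :=
  fun out => pvGoA_copy_aux cs count n j hj (j - i) i out le_rfl hij hnm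

theorem pvMain_aux (cs : List Char) (count : Int) :
    ∀ fuel pos (hpos : pos ≤ cs.length), cs.length - pos ≤ fuel → ∀ out n,
      pvGoA cs count out n pos = pvGoB cs count n pos out hpos := by
  intro fuel
  induction fuel with
  | zero =>
    intro pos hpos hf out n
    have hpe : pos = cs.length := by omega
    subst hpe
    have hnil : cs.drop cs.length = [] := by simp
    have hj : pvNextJ cs cs.length = -1 :=
      (pvNextJ_eq_neg_one_iff le_rfl).mpr (fun k hk hm => by have := hm.1; omega)
    rw [pvGoA, dif_neg (lt_irrefl _), pvGoB]
    by_cases hb : count = 0 ∨ n < count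
    · rw [if_pos hb, dif_pos hj, hnil, List.append_nil]
    · rw [if_neg hb, hnil, List.append_nil]
  | succ f ih =>
    intro pos hpos hf out n
    rw [pvGoB]
    by_cases hb : count = 0 ∨ n < count
    · rw [if_pos hb]
      by_cases hj : pvNextJ cs pos = -1
      · rw [dif_pos hj]
        have hnm := (pvNextJ_eq_neg_one_iff hpos).mp hj
        rw [pvGoA_copy cs count n pos cs.length hpos le_rfl
          (fun k hk _ => hnm k hk) out,
          pvGoA, dif_neg (lt_irrefl _)]
        simp [List.take_of_length_le]
      · rw [dif_neg hj]
        obtain ⟨hge, hM, hleast⟩ := pvNextJ_found hpos hj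
        have hnn : (0:Int) ≤ pvNextJ cs pos := le_trans (by omega) (pvNextJ_bounds hpos hj).1
        have hJlen : (pvNextJ cs pos).toNat + 1 < cs.length := hM.1
        rw [pvGoA_copy cs count n pos (pvNextJ cs pos).toNat hge (by omega) hleast out,
          pvGoA, dif_pos (show (pvNextJ cs pos).toNat < cs.length by omega),
          if_pos ⟨hM.2.1, hM.1, hM.2.2, hb⟩]
        have hacc : out ++ (cs.drop pos).take ((pvNextJ cs pos).toNat - pos) ++
            [cs.getD ((pvNextJ cs pos).toNat + 1) ' '] =
            out ++ PySem.List.slice cs (some (pos : Int)) (some (pvNextJ cs pos)) ++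
            [(PySem.List.pyGet? cs (pvNextJ cs pos + 1)).getD ' '] := by
          rw [PySem.List.slice_toNat cs (by omega) hnn,
            PySem.List.pyGet?_of_nonneg cs (by omega : (0:Int) ≤ pvNextJ cs pos + 1),
            show (pvNextJ cs pos + 1).toNat = (pvNextJ cs pos).toNat + 1 by omega]
          simp [List.getD_eq_getElem?_getD]
        rw [hacc]
        exact ih ((pvNextJ cs pos).toNat + 2) ((pvNextJ_bounds hpos hj).2) (by omega) _ (n+1)
    · rw [if_neg hb, pvGoA_dead cs count n hb pos out]

theorem pvMain (cs : List Char) (count : Int) :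
    ∀ pos (hpos : pos ≤ cs.length) out n,
      pvGoA cs count out n pos = pvGoB cs count n pos out hpos :=
  fun pos hpos out n => pvMain_aux cs count (cs.length - pos) pos hpos le_rfl out n

-- ===== VERDICT (by name: the statement is the Claim_ definition above) =====
theorem subn_trim_before_close_bracket_py_spec : Claim_equal_subn_trim_before_close_bracket_py := by
  intro string count _
  unfold Spec_subn_trim_before_close_bracket_py subn_trim_before_close_bracket_py
    subn_trim_before_close_bracket_py_alt
  rw [pvMain string.toList count 0 (Nat.zero_le _) [] 0]
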